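-- pv_equiv track=rewrite | github.com/Emma-MacK/stp_tutorials | emma_answers/python_exercises_2/exercise_2_4.py | correct_bases
-- ===== SOURCE A (Python) =====
-- def correct_bases(seq):
--     corrected_seq = ""
--     for i in seq:
--         bases = ["A", "T", "C", "G", "a", "t", "c", "G"]
--         if i in bases:
--             corrected_seq = corrected_seq + i
--         else:
--             corrected_seq = corrected_seq + "N"
--     return corrected_seq
-- ===== SOURCE B (Python) =====
-- import re
--
-- def correct_bases(seq):
--     # Single regex substitution: every character outside A,T,C,G,a,t,c becomes N.
--     # (lowercase g is intentionally not in the class: A's allowed list omits it.)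
--     return re.sub(r'[^ATCGatc]', 'N', seq)
-- ===== Notes on version B (the rewrite author's own statement) =====
-- stated objective: idiomatic
-- what changed: Replaced the per-character loop with string concatenation by a single regex substitution re.sub(r'[^ATCGatc]', 'N', seq) over the whole string.
import Mathlib
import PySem

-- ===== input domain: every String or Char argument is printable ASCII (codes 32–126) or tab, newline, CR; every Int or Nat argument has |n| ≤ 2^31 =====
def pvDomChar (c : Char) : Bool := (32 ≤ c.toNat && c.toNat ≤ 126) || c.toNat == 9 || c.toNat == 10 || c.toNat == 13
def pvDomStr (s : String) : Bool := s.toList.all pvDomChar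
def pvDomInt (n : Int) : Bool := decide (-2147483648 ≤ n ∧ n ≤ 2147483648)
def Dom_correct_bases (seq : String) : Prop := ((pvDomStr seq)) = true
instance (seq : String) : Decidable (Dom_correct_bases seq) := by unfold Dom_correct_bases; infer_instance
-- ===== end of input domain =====

-- ===== PORT A =====
-- B is the same task written as one regex substitution instead of an accumulating loop (idiomatic).
def correct_bases (seq : String) : String :=
  String.mk (seq.toList.foldl
    (fun corrected_seq i =>
      let bases : List Char := ['A', 'T', 'C', 'G', 'a', 't', 'c', 'G']
      if i ∈ bases then corrected_seq ++ [i] else corrected_seq ++ ['N'])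
    [])

-- ===== PORT B =====
-- re.sub(r'[^ATCGatc]', 'N', seq): the single-character negated class is applied to each
-- character independently; exact port of that regex semantics.
def correct_bases_alt (seq : String) : String :=
  String.mk (seq.toList.map (fun c => if c ∈ (['A', 'T', 'C', 'G', 'a', 't', 'c'] : List Char) then c else 'N'))

-- ===== PRECONDITION & SPEC =====
def Spec_correct_bases (seq : String) (out : String) : Prop := out = correct_bases_alt seq
instance (seq : String) (out : String) : Decidable (Spec_correct_bases seq out) := by unfold Spec_correct_bases; infer_instance

-- ===== CLAIM (what is proved, stated in full; the proofs are below) =====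
def Claim_equal_correct_bases : Prop := ∀ (seq : String), Dom_correct_bases seq → Spec_correct_bases seq (correct_bases seq)

-- ===== LEMMAS AND PROOFS =====
lemma correct_bases_foldl (l acc : List Char) :
    l.foldl
      (fun corrected_seq i =>
        let bases : List Char := ['A', 'T', 'C', 'G', 'a', 't', 'c', 'G']
        if i ∈ bases then corrected_seq ++ [i] else corrected_seq ++ ['N'])
      acc
    = acc ++ l.map (fun c => if c ∈ (['A', 'T', 'C', 'G', 'a', 't', 'c'] : List Char) then c else 'N') := by
  induction l generalizing acc with
  | nil => simp
  | cons a l ih =>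
    simp only [List.foldl, List.map, ih]
    have h : (a ∈ (['A', 'T', 'C', 'G', 'a', 't', 'c', 'G'] : List Char)) ↔
        (a ∈ (['A', 'T', 'C', 'G', 'a', 't', 'c'] : List Char)) := by
      simp [List.mem_cons]; tauto
    by_cases hc : a ∈ (['A', 'T', 'C', 'G', 'a', 't', 'c'] : List Char) <;>
      simp [h, hc]

-- ===== VERDICT (by name: the statement is the Claim_ definition above) =====
theorem correct_bases_spec : Claim_equal_correct_bases := by
  intro seq _
  unfold Spec_correct_bases correct_bases correct_bases_alt
  rw [correct_bases_foldl]
  simp
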